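-- pv_equiv track=rewrite | github.com/LaryPop26/UBB-CS | 1stSemester/Programming fundamentals/Exam/sesiune/functii 2.py | f
-- ===== SOURCE A (Python) =====
-- def f(n):
--     if n <= 0:
--         raise ValueError
--     while n > 0:
--         c = n % 10
--         n = n // 10
--         if c%2 == 0:
--             return True
--     return False
-- ===== SOURCE B (Python) =====
-- def f(n):
--     if n <= 0:
--         raise ValueError
--     return any(d in "02468" for d in str(n))
-- ===== Notes on version B (the rewrite author's own statement) =====
-- stated objective: idiomatic
-- what changed: Replaces the while-loop mod/floordiv digit extraction with an existential scan over the decimal string representation, testing each character against '02468'.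
import Mathlib
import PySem

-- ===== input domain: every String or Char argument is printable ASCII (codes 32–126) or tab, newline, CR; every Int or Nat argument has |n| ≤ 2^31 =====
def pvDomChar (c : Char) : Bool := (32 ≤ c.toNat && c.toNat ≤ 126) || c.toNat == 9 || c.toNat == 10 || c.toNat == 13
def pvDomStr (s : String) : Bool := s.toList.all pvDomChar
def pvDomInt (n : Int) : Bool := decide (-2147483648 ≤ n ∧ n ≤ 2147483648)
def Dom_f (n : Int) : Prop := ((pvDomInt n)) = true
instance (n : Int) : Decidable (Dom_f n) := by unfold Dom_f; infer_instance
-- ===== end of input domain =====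

-- B replaces A's while-loop mod/floordiv digit extraction with a scan of str(n); objective: idiomatic.
-- A raises ValueError on n <= 0; Pre_f excludes exactly those inputs.

-- ===== PORT A =====
-- A's while loop; on Pre_f (0 < n) Python's n % 10 / n // 10 coincide with Nat's % and /,
-- so the loop runs on n.toNat.
def fLoopA (m : Nat) : Bool :=
  if h : m = 0 then false
  else if m % 10 % 2 = 0 then true
  else fLoopA (m / 10)
decreasing_by exact Nat.div_lt_self (Nat.pos_of_ne_zero h) (by omega)

def f (n : Int) : Bool :=
  if n ≤ 0 then false  -- Python raises ValueError here; excluded by Pre_f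
  else fLoopA n.toNat

-- ===== PORT B =====
def f_alt (n : Int) : Bool :=
  if n ≤ 0 then false  -- Python raises ValueError here; excluded by Pre_f
  else (PySem.Int.toChars n).any (fun d => ['0','2','4','6','8'].contains d)

-- ===== PRECONDITION & SPEC =====
def Pre_f (n : Int) : Prop := 0 < n
instance (n : Int) : Decidable (Pre_f n) := by unfold Pre_f; infer_instance
def pvWitness_f : Int := 7
def Spec_f (n : Int) (out : Bool) : Prop := out = f_alt n
instance (n : Int) (out : Bool) : Decidable (Spec_f n out) := by unfold Spec_f; infer_instance

-- ===== CLAIM (what is proved, stated in full; the proofs are below) =====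
def Claim_equal_f : Prop := ∀ (n : Int), Dom_f n → Pre_f n → Spec_f n (f n)

-- ===== LEMMAS AND PROOFS =====

-- digits of m, most significant first (empty for 0)
def fDigs (m : Nat) : List Char :=
  if h : m = 0 then []
  else fDigs (m / 10) ++ [Nat.digitChar (m % 10)]
decreasing_by exact Nat.div_lt_self (Nat.pos_of_ne_zero h) (by omega)

lemma fDigs_zero : fDigs 0 = [] := by rw [fDigs]; rfl

lemma fLoopA_zero : fLoopA 0 = false := by rw [fLoopA]; rfl

lemma toDigitsCore_eq_digs : ∀ (fu m : Nat) (ds : List Char), m < fu → 0 < m →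
    Nat.toDigitsCore 10 fu m ds = fDigs m ++ ds := by
  intro fu
  induction fu using Nat.strong_induction_on with
  | _ fu ih =>
    intro m ds hlt hm
    match fu with
    | 0 => omega
    | fu + 1 =>
      rw [Nat.toDigitsCore]
      by_cases h0 : m / 10 = 0
      · simp only [h0, if_true]
        conv_rhs => rw [fDigs]
        simp [hm.ne', h0, fDigs_zero]
      · simp only [h0, if_false]
        have hdiv : m / 10 < m := Nat.div_lt_self hm (by omega)
        rw [ih fu (by omega) (m / 10) _ (by omega) (Nat.pos_of_ne_zero h0)]
        conv_rhs => rw [fDigs]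
        simp [hm.ne', List.append_assoc]

lemma digitChar_even : ∀ r : Nat, r < 10 →
    ((['0','2','4','6','8'].contains (Nat.digitChar r)) = (decide (r % 2 = 0))) := by decide

lemma fLoopA_eq_any : ∀ (m : Nat),
    fLoopA m = (fDigs m).any (fun d => ['0','2','4','6','8'].contains d) := by
  intro m
  induction m using Nat.strong_induction_on with
  | _ m ih =>
    by_cases hm : m = 0
    · subst hm; rw [fLoopA_zero, fDigs_zero]; rfl
    · rw [fLoopA, fDigs]
      have hdiv : m / 10 < m := Nat.div_lt_self (Nat.pos_of_ne_zero hm) (by omega)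
      have hrec := ih (m / 10) hdiv
      have hch := digitChar_even (m % 10) (Nat.mod_lt _ (by omega))
      simp only [hm, dite_false, List.any_append, List.any_cons, List.any_nil, hch, hrec,
        Bool.or_false]
      by_cases he : m % 10 % 2 = 0 <;> simp [he, Bool.or_comm]

-- ===== VERDICT (by name: the statement is the Claim_ definition above) =====
theorem f_spec : Claim_equal_f := by
  intro n _ hpre
  have hn : ¬ n ≤ 0 := by exact not_le.mpr hpre
  unfold Spec_f f f_alt
  simp only [hn, if_false]
  have hpos : 0 < n.toNat := by omega
  rw [PySem.Int.toChars]
  have hneg : ¬ n < 0 := by omega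
  simp only [hneg, if_false]
  rw [Nat.toDigits, toDigitsCore_eq_digs _ _ _ (by omega) hpos, List.append_nil]
  exact fLoopA_eq_any _
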